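-- pv_equiv track=rewrite | github.com/tgbugs/pyontutils | nifstd/nifstd_tools/sheets_sparc.py | curie_splitter
-- ===== SOURCE A (Python) =====
-- def curie_splitter(string):
--     ''' Splites string at curie. Only works if curie is at the end '''
--     stop_chars = [',', ';', ':', '-'] # curators puts these chars b/w label and curie
--     label_prefix = None # label + curie without id
--     id_ = None # curie id
--     label = '' # final label
--     prefix = '' # final prefix
--
--     if not string:
--         return string, str()
--
--     # if it's not possible for the string to be a curie - return
--     if ':' not in string:
--         return string, str()
--     else:
--         label_prefix, id_ = string.rsplit(':', 1)
--         # see if id even is an id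
--         try:
--             int(id_)
--         except:
--             return string, str()
--
--     for i, char in enumerate(label_prefix[::-1]):
--         if char in stop_chars:
--             i += 1
--             label = label_prefix[:len(label_prefix) - i]
--             break
--         else:
--             prefix = char + prefix
--
--     # sanity checks
--     if not label:
--         raise TypeError(f'label == {label}. Should be str.')
--     if not prefix:
--         raise TypeError(f'prefix == {prefix}. Should be str.')
--     if not id_:
--         raise TypeError(f'id_ == {id_}. Should be str.')
--
--     label = label.strip()
--     curie = (prefix + ':' + id_).strip()
--     return label, curie
-- ===== SOURCE B (Python) =====
-- def curie_splitter(string):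
--     ''' Splits string at curie. Only works if curie is at the end '''
--     if not string or ':' not in string:
--         return string, str()
--     label_prefix, id_ = string.rsplit(':', 1)
--     try:
--         int(id_)
--     except ValueError:
--         return string, str()
--     # one forward scan: remember the rightmost separator between label and prefix
--     pos = -1
--     for i, ch in enumerate(label_prefix):
--         if ch in ',;:-':
--             pos = i
--     label = label_prefix[:pos] if pos > 0 else ''
--     prefix = label_prefix[pos + 1:] if pos > 0 else ''
--     if not label:
--         raise TypeError(f'label == {label}. Should be str.')
--     if not prefix:
--         raise TypeError(f'prefix == {prefix}. Should be str.')
--     if not id_: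
--         raise TypeError(f'id_ == {id_}. Should be str.')
--     return label.strip(), (prefix + ':' + id_).strip()
-- ===== Notes on version B (the rewrite author's own statement) =====
-- stated objective: simpler
-- what changed: A scans label_prefix right-to-left with an early break while accumulating the prefix character by character; B does one forward scan that only remembers the rightmost separator index and then slices label and prefix out of label_prefix.
import Mathlib
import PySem

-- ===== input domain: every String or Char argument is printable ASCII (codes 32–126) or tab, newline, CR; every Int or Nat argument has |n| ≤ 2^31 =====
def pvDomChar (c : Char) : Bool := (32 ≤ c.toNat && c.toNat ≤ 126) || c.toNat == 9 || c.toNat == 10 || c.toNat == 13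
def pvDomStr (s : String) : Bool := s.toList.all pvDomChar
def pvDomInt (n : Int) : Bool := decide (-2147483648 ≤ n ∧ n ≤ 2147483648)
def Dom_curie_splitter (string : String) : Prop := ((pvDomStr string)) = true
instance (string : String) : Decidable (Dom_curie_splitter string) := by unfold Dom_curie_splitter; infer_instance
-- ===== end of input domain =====

-- B replaces A's reverse scan-with-break that accumulates the prefix by a single forward
-- scan remembering the rightmost separator index, then slices label/prefix out (simpler).
-- Equivalence is about return values; inputs where A raises TypeError are outside Pre_.

-- shared by both ports and Pre_: the characters curators put between label and curie
def stopChars : List Char := [',', ';', ':', '-']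

-- hand port of s.rsplit(':', 1) for the case ':' ∈ s (exact there: the part after the
-- last ':' and the part before it); both Pythons call rsplit(':', 1) under that guard
def pvRsplitColon (cs : List Char) : List Char × List Char :=
  let r := cs.reverse
  let idr := r.takeWhile (fun c => c ≠ ':')
  ((r.drop (idr.length + 1)).reverse, idr.reverse)

-- ===== PORT A =====
-- A's loop: for i, char in enumerate(label_prefix[::-1]): break at a stop char with
-- label = label_prefix[:len-i-1], else prefix = char + prefix; returns (label, prefix)
def loopA (lp : List Char) : List Char → Nat → List Char → List Char × List Char
  | [], _, pre => ([], pre)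
  | c :: rest, i, pre =>
      if stopChars.contains c then (lp.take (lp.length - (i + 1)), pre)
      else loopA lp rest (i + 1) (c :: pre)

def curie_splitter (string : String) : String × String :=
  let cs := string.toList
  if cs = [] then (string, "")
  else if PySem.Chars.isIn [':'] cs = false then (string, "")
  else
    let lp := (pvRsplitColon cs).1
    let id_ := (pvRsplitColon cs).2
    match PySem.Int.ofChars? id_ with
    | none => (string, "")
    | some _ =>
      let r := loopA lp lp.reverse 0 []
      let label := r.1
      let pref := r.2
      if label = [] then ("", "")       -- Python: raise TypeError (outside Pre_)
      else if pref = [] then ("", "") -- Python: raise TypeError (outside Pre_)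
      else if id_ = [] then ("", "")    -- Python: raise TypeError (outside Pre_)
      else (String.ofList (PySem.Chars.strip label),
            String.ofList (PySem.Chars.strip (pref ++ ':' :: id_)))

-- ===== PORT B =====
def curie_splitter_alt (string : String) : String × String :=
  let cs := string.toList
  if cs = [] ∨ PySem.Chars.isIn [':'] cs = false then (string, "")
  else
    let lp := (pvRsplitColon cs).1
    let id_ := (pvRsplitColon cs).2
    match PySem.Int.ofChars? id_ with
    | none => (string, "")
    | some _ =>
      let pos : Int := (PySem.List.enumerate lp 0).foldl
        (fun acc p => if stopChars.contains p.2 then p.1 else acc) (-1)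
      let label := if 0 < pos then lp.take pos.toNat else []
      let pref := if 0 < pos then lp.drop (pos.toNat + 1) else []
      if label = [] then ("", "")       -- Python: raise TypeError (outside Pre_)
      else if pref = [] then ("", "") -- Python: raise TypeError (outside Pre_)
      else if id_ = [] then ("", "")    -- Python: raise TypeError (outside Pre_)
      else (String.ofList (PySem.Chars.strip label),
            String.ofList (PySem.Chars.strip (pref ++ ':' :: id_)))

-- ===== PRECONDITION & SPEC =====
-- Pre_ excludes exactly the inputs where A raises TypeError: a colon-containing string
-- with an int-like tail whose label_pref has no stop char strictly inside it
-- (rightmost stop char absent, first, or last), i.e. empty label or empty pref.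
def Pre_curie_splitter (string : String) : Prop :=
  string.toList = [] ∨ PySem.Chars.isIn [':'] string.toList = false ∨
  PySem.Int.ofChars? (pvRsplitColon string.toList).2 = none ∨
  (let lp := (pvRsplitColon string.toList).1
   let i := (lp.reverse.findIdx? (fun c => stopChars.contains c)).getD lp.length
   0 < i ∧ i + 1 < lp.length)
instance (string : String) : Decidable (Pre_curie_splitter string) := by
  unfold Pre_curie_splitter; infer_instance

def pvWitness_curie_splitter : String := "x-y:1"

def Spec_curie_splitter (string : String) (out : String × String) : Prop := out = curie_splitter_alt string
instance (string : String) (out : String × String) : Decidable (Spec_curie_splitter string out) := by unfold Spec_curie_splitter; infer_instance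

-- ===== CLAIM (what is proved, stated in full; the proofs are below) =====
def Claim_equal_curie_splitter : Prop := ∀ (string : String), Dom_curie_splitter string → Pre_curie_splitter string → Spec_curie_splitter string (curie_splitter string)

-- ===== LEMMAS AND PROOFS =====

-- A's reverse loop, generalized: processing r (the not-yet-seen part of label_prefix,
-- reversed) after having accumulated the stop-free processed suffix v as prefix.
theorem loopA_spec (r v : List Char) (hv : ∀ c ∈ v, stopChars.contains c = false) :
    loopA (r.reverse ++ v) r v.length v =
      match r.findIdx? (fun c => stopChars.contains c) with
      | some i => ((r.drop (i + 1)).reverse, (r.take i).reverse ++ v)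
      | none => ([], r.reverse ++ v) := by
  induction r generalizing v with
  | nil => simp [loopA]
  | cons c r' ih =>
    rw [List.findIdx?_cons]
    by_cases hc : stopChars.contains c
    · rw [if_pos (show (fun c => stopChars.contains c) c = true from hc)]
      rw [loopA, if_pos hc]
      simp only [List.length_append, List.length_reverse, List.length_cons,
        List.drop_succ_cons, List.drop_zero, List.take_zero, List.reverse_nil,
        List.nil_append]
      rw [show (c :: r').reverse ++ v = r'.reverse ++ ([c] ++ v) by simp]
      rw [show r'.length + 1 + v.length - (v.length + 1) = r'.reverse.length by rw [List.length_reverse]; omega]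
      rw [List.take_left]
    · have hv' : ∀ x ∈ c :: v, stopChars.contains x = false := by
        intro x hx
        rcases List.mem_cons.mp hx with rfl | hx'
        · simpa using hc
        · exact hv _ hx'
      have H := ih (c :: v) hv'
      rw [loopA, if_neg hc]
      rw [show (c :: r').reverse ++ v = r'.reverse ++ (c :: v) by simp]
      rw [show v.length + 1 = (c :: v).length from rfl]
      rw [H]
      have hcc : c ∉ stopChars := by simpa using hc
      cases hfi : r'.findIdx? (fun c => stopChars.contains c) with
      | none => simp [hcc]
      | some i => simp [hcc, List.take_succ_cons, List.drop_succ_cons]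

theorem loopA_top (lp : List Char) :
    loopA lp lp.reverse 0 [] =
      match lp.reverse.findIdx? (fun c => stopChars.contains c) with
      | some i => ((lp.reverse.drop (i + 1)).reverse, (lp.reverse.take i).reverse)
      | none => ([], lp) := by
  have H := loopA_spec lp.reverse [] (by intro c h; simp at h)
  simp only [List.append_nil, List.reverse_reverse, List.length_nil] at H
  rw [H]

-- B's fold over enumerate: the index of the last stop char, or -1
theorem foldB_spec (lp : List Char) :
    (PySem.List.enumerate lp 0).foldl
        (fun acc (p : Int × Char) => if stopChars.contains p.2 then p.1 else acc) (-1) =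
      match lp.reverse.findIdx? (fun c => stopChars.contains c) with
      | some i => ((lp.length : Int) - 1 - i)
      | none => -1 := by
  induction lp using List.reverseRecOn with
  | nil => simp [PySem.List.enumerate]
  | append_singleton l c ih =>
    rw [PySem.List.enumerate_append, List.foldl_append, ih]
    rw [List.reverse_concat, List.findIdx?_cons]
    simp only [PySem.List.enumerate, List.foldl_cons, List.foldl_nil]
    by_cases hc : stopChars.contains c
    · rw [if_pos hc, if_pos (show (fun c => stopChars.contains c) c = true from hc)]
      simp
    · rw [if_neg hc, if_neg (show ¬ (fun c => stopChars.contains c) c = true from hc)]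
      cases hfi : l.reverse.findIdx? (fun c => stopChars.contains c) with
      | none => simp
      | some i =>
        simp only [Option.map_some, List.length_append, List.length_cons, List.length_nil]
        push_cast
        ring

-- ===== VERDICT (by name: the statement is the Claim_ definition above) =====
theorem curie_splitter_spec : Claim_equal_curie_splitter := by
  intro s _ hpre
  unfold Spec_curie_splitter curie_splitter curie_splitter_alt
  by_cases h0 : s.toList = []
  · simp [h0]
  by_cases h1 : PySem.Chars.isIn [':'] s.toList = false
  · simp [h0, h1]
  rw [if_neg h0, if_neg h1, if_neg (by rw [not_or]; exact ⟨h0, h1⟩)]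
  dsimp only
  cases hof : PySem.Int.ofChars? (pvRsplitColon s.toList).2 with
  | none => rfl
  | some v =>
    simp only
    unfold Pre_curie_splitter at hpre
    rcases hpre with h | h | h | h
    · exact absurd h h0
    · exact absurd h h1
    · rw [hof] at h; simp at h
    · simp only at h
      cases hfi : (pvRsplitColon s.toList).1.reverse.findIdx?
          (fun c => stopChars.contains c) with
      | none => rw [hfi] at h; simp only [Option.getD_none] at h; omega
      | some i =>
        rw [hfi] at h
        simp only [Option.getD_some] at h
        obtain ⟨hi0, hin⟩ := h
        rw [loopA_top, foldB_spec, hfi]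
        simp only
        set lp := (pvRsplitColon s.toList).1 with hlp
        have hlpos : (0 : Int) < (lp.length : Int) - 1 - i := by omega
        rw [if_pos hlpos, if_pos hlpos]
        have htn : ((lp.length : Int) - 1 - i).toNat = lp.length - 1 - i := by omega
        rw [htn]
        have hlab : (lp.reverse.drop (i + 1)).reverse = lp.take (lp.length - 1 - i) := by
          rw [List.drop_reverse, List.reverse_reverse]
          congr 1
          omega
        have hpref : (lp.reverse.take i).reverse = lp.drop (lp.length - 1 - i + 1) := by
          rw [List.take_reverse, List.reverse_reverse]
          congr 1
          omega
        rw [hlab, hpref]
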